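-- pv_equiv track=rewrite | github.com/QuBenhao/LeetCode | problems/problems_2306/solution.py | distinctNames
-- ===== SOURCE A (Python) =====
-- from typing import List
--
-- from collections import defaultdict
-- from itertools import combinations
--
-- def distinctNames(ideas: List[str]) -> int:
--     groups = defaultdict(set)
--     for s in ideas:
--         groups[s[0]].add(s[1:])
--     ans = 0
--     for a, b in combinations(groups.values(), 2):
--         cannot = len(a & b)
--         ans += (len(a) - cannot) * (len(b) - cannot)
--     return ans * 2
-- ===== SOURCE B (Python) =====
-- from itertools import combinations
--
--
-- def distinctNames(ideas):
--     # Inverted index: suffix -> set of first letters that occur with it.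
--     letters = list(dict.fromkeys(s[0] for s in ideas))  # first letters, first-occurrence order
--     index = {}
--     for s in ideas:
--         index.setdefault(s[1:], set()).add(s[0])
--     sets = list(index.values())
--     sizes = {x: sum(1 for g in sets if x in g) for x in letters}
--     ans = 0
--     for x, y in combinations(letters, 2):
--         c = sum(1 for g in sets if x in g and y in g)
--         ans += (sizes[x] - c) * (sizes[y] - c)
--     return 2 * ans
-- ===== Notes on version B (the rewrite author's own statement) =====
-- stated objective: alternative
-- what changed: B replaces A's letter->suffix-set groups with per-pair set intersections by an inverted suffix->first-letters index, precomputed per-letter group sizes, and per-pair common counts read off the index's sets.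
import Mathlib
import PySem

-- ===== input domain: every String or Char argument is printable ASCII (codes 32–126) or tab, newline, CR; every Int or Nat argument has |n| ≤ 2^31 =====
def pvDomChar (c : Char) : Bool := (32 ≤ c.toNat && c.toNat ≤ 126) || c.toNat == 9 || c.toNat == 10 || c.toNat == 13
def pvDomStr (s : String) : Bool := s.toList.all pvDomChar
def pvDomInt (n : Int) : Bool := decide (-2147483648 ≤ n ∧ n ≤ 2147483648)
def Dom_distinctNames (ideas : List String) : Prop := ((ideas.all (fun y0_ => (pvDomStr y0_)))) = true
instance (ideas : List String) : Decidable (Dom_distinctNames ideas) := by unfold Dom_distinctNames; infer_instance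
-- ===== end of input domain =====

-- B replaces A's per-pair set intersections over letter groups by an inverted suffix->letters
-- index whose sets are counted per pair (objective: alternative decomposition, same result).

-- ===== PORT A =====
-- s[0] (raises IndexError on "", excluded by Pre_; the ' ' default is never read there)
def pyHd (s : String) : Char := (PySem.Str.pyGet? s 0).getD ' '
-- s[1:]
def pyTl (s : String) : String := PySem.Str.slice s (some 1) none

def distinctNames (ideas : List String) : Int :=
  let groups : PySem.Dict Char (PySem.Set String) :=
    ideas.foldl (fun d s => d.modify (pyHd s) [] (fun g => PySem.Set.add g (pyTl s)))
      PySem.Dict.empty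
  let ans : Int :=
    (PySem.List.combinations groups.values 2).foldl
      (fun acc c =>
        match c with
        | [a, b] =>
          let cannot : Int := PySem.Set.len (PySem.Set.inter a b)
          acc + (PySem.Set.len a - cannot) * (PySem.Set.len b - cannot)
        | _ => acc) 0
  ans * 2

-- ===== PORT B =====
def distinctNames_alt (ideas : List String) : Int :=
  let letters : List Char := PySem.List.dedup (ideas.map pyHd)
  let index : PySem.Dict String (PySem.Set Char) :=
    ideas.foldl (fun d s => d.modify (pyTl s) [] (fun g => PySem.Set.add g (pyHd s)))
      PySem.Dict.empty
  let sets : List (PySem.Set Char) := index.values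
  let sizes : PySem.Dict Char Int :=
    letters.foldl
      (fun d x =>
        d.insert x (sets.foldl (fun n g => if PySem.Set.contains g x then n + 1 else n) (0 : Int)))
      PySem.Dict.empty
  let ans : Int :=
    (PySem.List.combinations letters 2).foldl
      (fun acc c =>
        -- 'for x, y in combinations(letters, 2)': every element is a 2-list
        match c with
        | [] => acc
        | x :: rest =>
          match rest with
          | [] => acc
          | y :: _ =>
            let cnt : Int :=
              sets.foldl
                (fun n g => if PySem.Set.contains g x && PySem.Set.contains g y then n + 1 else n)
                (0 : Int)
            acc + (sizes.getD x 0 - cnt) * (sizes.getD y 0 - cnt)) 0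
  2 * ans

-- ===== PRECONDITION & SPEC =====
-- Pre_ excludes exactly the inputs containing an empty string, on which Python A (s[0]) raises IndexError.
def Pre_distinctNames (ideas : List String) : Prop := ∀ s ∈ ideas, s ≠ ""
instance (ideas : List String) : Decidable (Pre_distinctNames ideas) := by
  unfold Pre_distinctNames; infer_instance
def pvWitness_distinctNames : List String := ["coffee", "donuts", "time", "toffee"]

def Spec_distinctNames (ideas : List String) (out : Int) : Prop := out = distinctNames_alt ideas
instance (ideas : List String) (out : Int) : Decidable (Spec_distinctNames ideas out) := by
  unfold Spec_distinctNames; infer_instance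

-- ===== CLAIM (what is proved, stated in full; the proofs are below) =====
def Claim_equal_distinctNames : Prop := ∀ (ideas : List String), Dom_distinctNames ideas → Pre_distinctNames ideas → Spec_distinctNames ideas (distinctNames ideas)


-- ===== LEMMAS AND PROOFS =====

-- the grouping fold (used, transposed, by both ports): membership characterisation
theorem mem_gfold {κ α : Type} [DecidableEq κ] [DecidableEq α]
    (l : List (κ × α)) (d : PySem.Dict κ (PySem.Set α)) (k : κ) (a : α) :
    a ∈ (l.foldl (fun d p => d.modify p.1 [] (fun g => PySem.Set.add g p.2)) d).getD k [] ↔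
      a ∈ d.getD k [] ∨ (k, a) ∈ l := by
  induction l generalizing d with
  | nil => simp
  | cons p t ih =>
    simp only [List.foldl_cons, ih, PySem.Dict.getD_modify, List.mem_cons]
    split_ifs with hk
    · subst hk; simp [PySem.Set.mem_add, Prod.ext_iff]; tauto
    · simp [Prod.ext_iff]; tauto

theorem nodup_gfold {κ α : Type} [DecidableEq κ] [DecidableEq α]
    (l : List (κ × α)) (d : PySem.Dict κ (PySem.Set α))
    (hd : ∀ k, (d.getD k []).Nodup) (k : κ) :
    ((l.foldl (fun d p => d.modify p.1 [] (fun g => PySem.Set.add g p.2)) d).getD k []).Nodup := by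
  induction l generalizing d with
  | nil => exact hd k
  | cons p t ih =>
    refine ih _ (fun k => ?_)
    rw [PySem.Dict.getD_modify]
    split_ifs with hk
    · exact PySem.Set.nodup_add _ _ (hd p.1)
    · exact hd k

theorem len_eq_of_nodup_mem {α : Type} (l1 l2 : List α)
    (h1 : l1.Nodup) (h2 : l2.Nodup) (h : ∀ a, a ∈ l1 ↔ a ∈ l2) : l1.length = l2.length :=
  ((List.perm_ext_iff_of_nodup h1 h2).2 h).length_eq

-- A's groups dict and B's inverted index, as standalone terms
def pvGroups (ideas : List String) : PySem.Dict Char (PySem.Set String) :=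
  ideas.foldl (fun d s => d.modify (pyHd s) [] (fun g => PySem.Set.add g (pyTl s)))
    PySem.Dict.empty

def pvIndex (ideas : List String) : PySem.Dict String (PySem.Set Char) :=
  ideas.foldl (fun d s => d.modify (pyTl s) [] (fun g => PySem.Set.add g (pyHd s)))
    PySem.Dict.empty

theorem mem_pvGroups (ideas : List String) (x : Char) (t : String) :
    t ∈ (pvGroups ideas).getD x [] ↔ ∃ s ∈ ideas, pyHd s = x ∧ pyTl s = t := by
  have : pvGroups ideas
      = (ideas.map (fun s => (pyHd s, pyTl s))).foldl
          (fun d p => d.modify p.1 [] (fun g => PySem.Set.add g p.2)) PySem.Dict.empty := by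
    unfold pvGroups
    exact (List.foldl_map (f := fun s => (pyHd s, pyTl s))
      (g := fun d p => d.modify p.1 [] fun g => PySem.Set.add g p.2)
      (l := ideas) (init := PySem.Dict.empty)).symm
  rw [this, mem_gfold]
  simp only [PySem.Dict.getD_empty, List.not_mem_nil, false_or, List.mem_map, Prod.ext_iff]

theorem mem_pvIndex (ideas : List String) (t : String) (x : Char) :
    x ∈ (pvIndex ideas).getD t [] ↔ ∃ s ∈ ideas, pyHd s = x ∧ pyTl s = t := by
  have : pvIndex ideas
      = (ideas.map (fun s => (pyTl s, pyHd s))).foldl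
          (fun d p => d.modify p.1 [] (fun g => PySem.Set.add g p.2)) PySem.Dict.empty := by
    unfold pvIndex
    exact (List.foldl_map (f := fun s => (pyTl s, pyHd s))
      (g := fun d p => d.modify p.1 [] fun g => PySem.Set.add g p.2)
      (l := ideas) (init := PySem.Dict.empty)).symm
  rw [this, mem_gfold]
  simp only [PySem.Dict.getD_empty, List.not_mem_nil, false_or, List.mem_map, Prod.ext_iff]
  tauto

theorem nodup_pvGroups (ideas : List String) (x : Char) :
    ((pvGroups ideas).getD x []).Nodup := by
  have : pvGroups ideas
      = (ideas.map (fun s => (pyHd s, pyTl s))).foldl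
          (fun d p => d.modify p.1 [] (fun g => PySem.Set.add g p.2)) PySem.Dict.empty := by
    unfold pvGroups
    exact (List.foldl_map (f := fun s => (pyHd s, pyTl s))
      (g := fun d p => d.modify p.1 [] fun g => PySem.Set.add g p.2)
      (l := ideas) (init := PySem.Dict.empty)).symm
  rw [this]
  exact nodup_gfold _ _ (fun k => by simp [PySem.Dict.getD_empty]) x

theorem keys_pvGroups (ideas : List String) :
    (pvGroups ideas).keys = PySem.List.dedup (ideas.map pyHd) := by
  rw [pvGroups,
    PySem.Dict.keys_foldl_modify_key ideas pyHd []
      (fun _ s => (fun g => PySem.Set.add g (pyTl s))) PySem.Dict.empty]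
  rw [PySem.Dict.keys_empty, PySem.List.dedup_eq_ofList, PySem.Set.ofList_eq_foldl]
  rfl

theorem keys_pvIndex (ideas : List String) :
    (pvIndex ideas).keys = PySem.List.dedup (ideas.map pyTl) := by
  rw [pvIndex,
    PySem.Dict.keys_foldl_modify_key ideas pyTl []
      (fun _ s => (fun g => PySem.Set.add g (pyHd s))) PySem.Dict.empty]
  rw [PySem.Dict.keys_empty, PySem.List.dedup_eq_ofList, PySem.Set.ofList_eq_foldl]
  rfl

theorem nodup_keys_pvGroups (ideas : List String) : (pvGroups ideas).keys.Nodup := by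
  rw [keys_pvGroups, PySem.List.dedup_eq_ofList]; exact PySem.Set.nodup_ofList _

theorem nodup_keys_pvIndex (ideas : List String) : (pvIndex ideas).keys.Nodup := by
  rw [keys_pvIndex, PySem.List.dedup_eq_ofList]; exact PySem.Set.nodup_ofList _

-- B's per-letter count over the inverted index equals the size of A's letter group
theorem count_one (ideas : List String) (x : Char) :
    ((pvIndex ideas).values.countP (fun g => PySem.Set.contains g x) : Int)
      = PySem.Set.len ((pvGroups ideas).getD x []) := by
  rw [PySem.Dict.values_eq_map_keys _ (nodup_keys_pvIndex ideas) [], List.countP_map]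
  rw [PySem.Set.len]
  congr 1
  rw [List.countP_eq_length_filter]
  refine len_eq_of_nodup_mem _ _ (List.Nodup.filter _ (nodup_keys_pvIndex ideas))
    (nodup_pvGroups ideas x) (fun t => ?_)
  simp only [List.mem_filter, Function.comp_apply, PySem.Set.contains_iff, mem_pvIndex,
    mem_pvGroups, keys_pvIndex, PySem.List.dedup_eq_ofList, PySem.Set.mem_ofList, List.mem_map]
  constructor
  · rintro ⟨-, h⟩; exact h
  · rintro ⟨s, hs, h1, h2⟩; exact ⟨⟨s, hs, h2⟩, ⟨s, hs, h1, h2⟩⟩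

-- B's per-pair count over the inverted index equals the size of A's intersection
theorem count_two (ideas : List String) (x y : Char) :
    ((pvIndex ideas).values.countP
        (fun g => PySem.Set.contains g x && PySem.Set.contains g y) : Int)
      = PySem.Set.len (PySem.Set.inter ((pvGroups ideas).getD x []) ((pvGroups ideas).getD y [])) := by
  rw [PySem.Dict.values_eq_map_keys _ (nodup_keys_pvIndex ideas) [], List.countP_map]
  rw [PySem.Set.len]
  congr 1
  rw [List.countP_eq_length_filter]
  refine len_eq_of_nodup_mem _ _ (List.Nodup.filter _ (nodup_keys_pvIndex ideas))
    (PySem.Set.nodup_inter _ _ (nodup_pvGroups ideas x)) (fun t => ?_)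
  simp only [List.mem_filter, Function.comp_apply, Bool.and_eq_true, PySem.Set.contains_iff,
    mem_pvIndex, PySem.Set.mem_inter, mem_pvGroups, keys_pvIndex, PySem.List.dedup_eq_ofList,
    PySem.Set.mem_ofList, List.mem_map]
  constructor
  · rintro ⟨-, hx, hy⟩; exact ⟨hx, hy⟩
  · rintro ⟨⟨s, hs, h1, h2⟩, hy⟩; exact ⟨⟨s, hs, h2⟩, ⟨s, hs, h1, h2⟩, hy⟩

-- the sizes dict of B returns the stored count for every letter of the key list
theorem getD_sizes (letters : List Char) (hnd : letters.Nodup) (f : Char → Int)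
    (x : Char) (hx : x ∈ letters) :
    (letters.foldl (fun d k => d.insert k (f k)) PySem.Dict.empty).getD x 0 = f x := by
  have hitems := PySem.Dict.items_foldl_insert_fresh letters (fun k => k) f PySem.Dict.empty
    (fun a _ => PySem.Dict.contains_empty a) (by simpa using hnd)
  refine PySem.Dict.getD_of_mem_items _ ?_ ?_ 0
  · rw [hitems]; simp only [PySem.Dict.empty, List.nil_append]
    exact List.mem_map.2 ⟨x, hx, rfl⟩
  · exact PySem.Dict.nodup_keys_foldl_insert _ _ _ (by simp [PySem.Dict.keys_empty])

-- ===== VERDICT (by name: the statement is the Claim_ definition above) =====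
theorem distinctNames_spec : Claim_equal_distinctNames := by
  intro ideas _ _
  unfold Spec_distinctNames distinctNames distinctNames_alt
  rw [show (ideas.foldl (fun d s => d.modify (pyHd s) [] (fun g => PySem.Set.add g (pyTl s))) PySem.Dict.empty) = pvGroups ideas from rfl]
  rw [show (ideas.foldl (fun d s => d.modify (pyTl s) [] (fun g => PySem.Set.add g (pyHd s))) PySem.Dict.empty) = pvIndex ideas from rfl]
  dsimp only
  rw [PySem.Dict.values_eq_map_keys _ (nodup_keys_pvGroups ideas) [], keys_pvGroups,
    PySem.List.combinations_map, List.foldl_map, Int.mul_comm]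
  congr 1
  refine PySem.List.foldl_congr_mem _ _ _ _ (fun acc c hc => ?_)
  obtain ⟨hsub, hlen⟩ := (PySem.List.mem_combinations_iff _ _ _).1 hc
  match c, hlen with
  | [x, y], _ => ?_
  have hnd : (PySem.List.dedup (ideas.map pyHd)).Nodup := by
    rw [PySem.List.dedup_eq_ofList]; exact PySem.Set.nodup_ofList _
  have hx : x ∈ PySem.List.dedup (ideas.map pyHd) := hsub.subset (by simp)
  have hy : y ∈ PySem.List.dedup (ideas.map pyHd) := hsub.subset (by simp)
  simp only [List.map]
  rw [getD_sizes _ hnd _ x hx, getD_sizes _ hnd _ y hy,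
    PySem.List.foldl_if_add_one (fun g => PySem.Set.contains g x),
    PySem.List.foldl_if_add_one (fun g => PySem.Set.contains g y),
    PySem.List.foldl_if_add_one (fun g => PySem.Set.contains g x && PySem.Set.contains g y),
    zero_add, zero_add, zero_add, count_one, count_one, count_two]
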